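-- pv_equiv track=rewrite | github.com/marinimau/Spike-detection-for-cooking-activity-recognition-based-on-indoor-air-quality-sensor | data_testing/intervals_test.py | calc_n_intervals
-- ===== SOURCE A (Python) =====
-- def calc_n_intervals(intervals):
--     open_intr = False
--     intr_count = 0
--
--     for intr in intervals:
--         if intr == 1:
--             # se sono appena entrato
--             if not open_intr:
--                 open_intr = True
--                 intr_count += 1
--         else:
--             # se sono appena uscito
--             if open_intr:
--                 open_intr = False
--     return intr_count
-- ===== SOURCE B (Python) =====
-- def calc_n_intervals(intervals):
--     # Stage 1: compress consecutive duplicates into a run-key list;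
--     # Stage 2: count the runs whose key is 1.
--     keys = []
--     for x in intervals:
--         if not keys or keys[-1] != x:
--             keys.append(x)
--     return keys.count(1)
-- ===== Notes on version B (the rewrite author's own statement) =====
-- stated objective: alternative
-- what changed: Replaces the open/closed boolean state machine with a staged group-then-filter decomposition: first compress the list into its run-length-encoding key list (one key per maximal run of equal values), then count the keys equal to 1.
import Mathlib
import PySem

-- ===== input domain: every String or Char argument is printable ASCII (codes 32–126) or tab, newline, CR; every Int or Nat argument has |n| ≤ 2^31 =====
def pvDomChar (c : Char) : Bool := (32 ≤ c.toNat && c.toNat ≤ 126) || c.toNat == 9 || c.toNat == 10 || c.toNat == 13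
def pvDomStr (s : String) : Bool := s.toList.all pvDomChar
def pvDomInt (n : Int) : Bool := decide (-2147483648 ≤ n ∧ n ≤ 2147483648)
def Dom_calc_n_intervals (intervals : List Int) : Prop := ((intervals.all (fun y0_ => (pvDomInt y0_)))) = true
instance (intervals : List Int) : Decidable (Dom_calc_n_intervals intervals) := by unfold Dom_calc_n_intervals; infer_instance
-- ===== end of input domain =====

-- ===== PORT A =====
-- B compresses the list into its run-key list and counts keys equal to 1, instead of A's flag state machine (objective: alternative decomposition, same cost).
def calc_n_intervals (intervals : List Int) : Int :=
  (intervals.foldl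
    (fun (s : Bool × Int) intr =>
      if intr = 1 then (if !s.1 then (true, s.2 + 1) else s)
      else (if s.1 then (false, s.2) else s))
    (false, 0)).2

-- ===== PORT B =====
def calc_n_intervals_alt (intervals : List Int) : Int :=
  let keys := intervals.foldl
    (fun (ks : List Int) x => if ks = [] ∨ ks.getLast? ≠ some x then ks ++ [x] else ks) []
  (keys.count 1 : Nat)

-- ===== PRECONDITION & SPEC =====
def Spec_calc_n_intervals (intervals : List Int) (out : Int) : Prop := out = calc_n_intervals_alt intervals
instance (intervals : List Int) (out : Int) : Decidable (Spec_calc_n_intervals intervals out) := by unfold Spec_calc_n_intervals; infer_instance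

-- ===== CLAIM (what is proved, stated in full; the proofs are below) =====
def Claim_equal_calc_n_intervals : Prop := ∀ (intervals : List Int), Dom_calc_n_intervals intervals → Spec_calc_n_intervals intervals (calc_n_intervals intervals)

-- ===== LEMMAS AND PROOFS =====

-- invariant: A's fold state is (does the current key list end in 1, count of 1-keys so far)
theorem pv_fold_inv (xs : List Int) : ∀ (ks : List Int) (c : Int),
    ((ks.count 1 : Nat) : Int) + c - (ks.count 1 : Nat) = c →
    (xs.foldl
      (fun (s : Bool × Int) intr =>
        if intr = 1 then (if !s.1 then (true, s.2 + 1) else s)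
        else (if s.1 then (false, s.2) else s))
      ((ks.getLast? == some 1), c))
    = (((xs.foldl
          (fun (ks : List Int) x => if ks = [] ∨ ks.getLast? ≠ some x then ks ++ [x] else ks) ks).getLast? == some 1),
       c + ((xs.foldl
          (fun (ks : List Int) x => if ks = [] ∨ ks.getLast? ≠ some x then ks ++ [x] else ks) ks).count 1 : Nat)
         - (ks.count 1 : Nat)) := by
  induction xs with
  | nil => intro ks c h; simpa using h
  | cons x rest ih =>
    intro ks c _
    rw [List.foldl_cons, List.foldl_cons]
    by_cases hx : x = 1
    · subst hx
      by_cases hb : ks.getLast? = some 1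
      · have hcond : ¬ (ks = [] ∨ ks.getLast? ≠ some 1) := by
          rintro (h | h)
          · simp [h] at hb
          · exact h hb
        rw [if_neg hcond]
        have := ih ks c (by omega)
        simpa [hb] using this
      · have hcond : (ks = [] ∨ ks.getLast? ≠ some 1) := Or.inr hb
        rw [if_pos hcond]
        have hb' : (ks.getLast? == some (1:Int)) = false := by simp [hb]
        rw [hb']
        have h1 : ((ks ++ [(1:Int)]).getLast? == some 1) = true := by
          simp
        have h2 : (ks ++ [(1:Int)]).count 1 = ks.count 1 + 1 := by
          simp [List.count_append]
        have := ih (ks ++ [1]) (c + 1) (by omega)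
        rw [h1, h2] at this
        rw [if_pos (show (1:Int) = 1 from rfl), if_pos (show (!(false:Bool)) = true from rfl)]
        rw [this]
        congr 1
        push_cast
        ring
    · by_cases hb : ks.getLast? = some 1
      · have hcond : (ks = [] ∨ ks.getLast? ≠ some x) := by
          right; rw [hb]; simp [Ne.symm hx]
        rw [if_pos hcond]
        have hb' : (ks.getLast? == some (1:Int)) = true := by simp [hb]
        rw [hb']
        have h1 : ((ks ++ [x]).getLast? == some (1:Int)) = false := by
          simp [hx]
        have h2 : (ks ++ [x]).count 1 = ks.count 1 := by
          simp [List.count_append, hx]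
        have := ih (ks ++ [x]) c (by omega)
        rw [h1, h2] at this
        simpa [hx] using this
      · have hb' : (ks.getLast? == some (1:Int)) = false := by simp [hb]
        rw [hb']
        by_cases hc : ks = [] ∨ ks.getLast? ≠ some x
        · rw [if_pos hc]
          have h1 : ((ks ++ [x]).getLast? == some (1:Int)) = false := by
            simp [hx]
          have h2 : (ks ++ [x]).count 1 = ks.count 1 := by
            simp [List.count_append, hx]
          have := ih (ks ++ [x]) c (by omega)
          rw [h1, h2] at this
          simpa [hx] using this
        · rw [if_neg hc]
          have := ih ks c (by omega)
          rw [hb'] at this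
          simpa [hx] using this

-- ===== VERDICT (by name: the statement is the Claim_ definition above) =====
theorem calc_n_intervals_spec : Claim_equal_calc_n_intervals := by
  intro xs _
  unfold Spec_calc_n_intervals calc_n_intervals calc_n_intervals_alt
  have := pv_fold_inv xs [] 0 (by simp)
  rw [show (([] : List Int).getLast? == some (1:Int)) = false from rfl] at this
  rw [this]
  simp
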